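-- pv_equiv track=rewrite | github.com/E-Isnard/Polytech | algoProgPeip1/td5/crypto.py | cryptoKey
-- ===== SOURCE A (Python) =====
-- def cryptoKey(key):
--     alpha = "abcdefghijklmnopqrstuvwxyz"
--     listAlpha = list(alpha)
--     listWordsKey = key.split(" ")
--     listKey = list(key)
--     for char in key:
--         if char in listAlpha:
--             listAlpha.remove(char)
--         else:
--             continue
--     new_alpha = "".join(listAlpha)
--     new_key = listWordsKey[0] + new_alpha
--     return new_key
-- ===== SOURCE B (Python) =====
-- def cryptoKey(key):
--     alpha = "abcdefghijklmnopqrstuvwxyz"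
--     used = set(key)
--     rest = "".join(c for c in alpha if c not in used)
--     return key.split(" ")[0] + rest
-- ===== Notes on version B (the rewrite author's own statement) =====
-- stated objective: idiomatic
-- what changed: B makes one pass over the fixed 26-letter alphabet, keeping letters absent from a set built from the key, instead of A's loop over the key that mutates the alphabet list with a linear membership test and removal per key character.
import Mathlib
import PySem

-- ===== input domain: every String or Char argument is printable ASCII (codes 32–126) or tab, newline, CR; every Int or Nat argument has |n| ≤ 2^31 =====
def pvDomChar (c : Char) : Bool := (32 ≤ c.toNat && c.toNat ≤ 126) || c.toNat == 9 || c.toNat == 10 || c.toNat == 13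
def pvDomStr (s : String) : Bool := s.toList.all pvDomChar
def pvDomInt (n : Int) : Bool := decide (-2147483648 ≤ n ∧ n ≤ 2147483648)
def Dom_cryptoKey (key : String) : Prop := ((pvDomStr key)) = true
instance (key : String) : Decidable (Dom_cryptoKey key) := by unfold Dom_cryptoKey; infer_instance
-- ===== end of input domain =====

-- B filters the fixed alphabet by a set of the key's characters instead of A's key-driven
-- mutation of the alphabet list (idiomatic; a timing run measured B faster).

-- ===== PORT A =====
-- A: for each char of key, remove it from the mutable alphabet list if present;
-- result is key.split(" ")[0] + "".join(remaining). split(" ")[0] never raises (split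
-- with an explicit sep is always nonempty), so headD "" is exact.
def cryptoKey (key : String) : String :=
  let alpha := "abcdefghijklmnopqrstuvwxyz"
  let listWordsKey := (PySem.Str.split? key " ").getD []
  let listAlpha := key.toList.foldl (fun l c => if c ∈ l then l.erase c else l) alpha.toList
  let newAlpha := String.ofList listAlpha   -- "".join of a list of chars
  listWordsKey.headD "" ++ newAlpha

-- ===== PORT B =====
def cryptoKey_alt (key : String) : String :=
  let alpha := "abcdefghijklmnopqrstuvwxyz"
  let used : PySem.Set Char := PySem.Set.ofList key.toList
  let rest := String.ofList (alpha.toList.filter (fun c => !(PySem.Set.contains used c)))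
  ((PySem.Str.split? key " ").getD []).headD "" ++ rest

-- ===== PRECONDITION & SPEC =====
def Spec_cryptoKey (key : String) (out : String) : Prop := out = cryptoKey_alt key
instance (key : String) (out : String) : Decidable (Spec_cryptoKey key out) := by unfold Spec_cryptoKey; infer_instance

-- ===== CLAIM (what is proved, stated in full; the proofs are below) =====
def Claim_equal_cryptoKey : Prop := ∀ (key : String), Dom_cryptoKey key → Spec_cryptoKey key (cryptoKey key)

-- ===== LEMMAS AND PROOFS =====

-- A's removal loop over the key, on a duplicate-free list, is a filter by non-membership in the key.
theorem fold_erase_eq_filter (ks : List Char) :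
    ∀ (l : List Char), l.Nodup →
      ks.foldl (fun l c => if c ∈ l then l.erase c else l) l
        = l.filter (fun c => !(ks.contains c)) := by
  induction ks with
  | nil => intro l _; simp
  | cons c ks ih =>
    intro l hl
    have hstep : (if c ∈ l then l.erase c else l) = l.filter (fun x => x != c) := by
      by_cases hc : c ∈ l
      · rw [if_pos hc, hl.erase_eq_filter]
      · simp only [if_neg hc, List.erase_of_not_mem hc]
        refine (List.filter_eq_self.2 ?_).symm
        intro x hx
        simp only [bne_iff_ne, ne_eq]
        exact fun h => hc (h ▸ hx)
    rw [List.foldl_cons, hstep, ih _ (hl.filter _), List.filter_filter]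
    refine List.filter_congr ?_
    intro x _
    by_cases h : x = c
    · simp [h]
    · simp [h]

theorem cryptoKey_spec : Claim_equal_cryptoKey := by
  intro key _
  unfold Spec_cryptoKey cryptoKey cryptoKey_alt
  have halpha : ("abcdefghijklmnopqrstuvwxyz".toList).Nodup := by decide
  show ((PySem.Str.split? key " ").getD []).headD "" ++
      String.ofList (key.toList.foldl (fun l c => if c ∈ l then l.erase c else l)
        "abcdefghijklmnopqrstuvwxyz".toList)
    = ((PySem.Str.split? key " ").getD []).headD "" ++
      String.ofList ("abcdefghijklmnopqrstuvwxyz".toList.filter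
        (fun c => !(PySem.Set.contains (PySem.Set.ofList key.toList) c)))
  rw [fold_erase_eq_filter _ _ halpha]
  congr 1
  congr 1
  exact List.filter_congr (by
    intro x _
    simp [PySem.Set.contains_eq_listContains, PySem.Set.mem_ofList])
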